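-- pv_equiv track=rewrite | github.com/lydd168/invest_agent | agents/markdown_reporter.py | _trim_sentences
-- ===== SOURCE A (Python) =====
-- def _trim_sentences(text: str, max_sentences: int = 2, max_chars: int = 600) -> str:
--     if not text:
--         return text
--     seps = [". ", "。", "! ", "？", "? "]
--     # naive sentence split
--     parts = [text]
--     for sep in seps:
--         tmp = []
--         for p in parts:
--             tmp.extend(p.split(sep))
--         parts = tmp
--     parts = [p.strip() for p in parts if p.strip()]
--     trimmed = ". ".join(parts[:max_sentences])
--     if len(trimmed) > max_chars:
--         trimmed = trimmed[: max_chars - 1] + "…"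
--     return trimmed
-- ===== SOURCE B (Python) =====
-- def _trim_sentences(text: str, max_sentences: int = 2, max_chars: int = 600) -> str:
--     if not text:
--         return text
--     # one pass over the text: cut at "。", "？", or at ".", "!", "?" followed by a space
--     parts = []
--     buf = []
--     i, n = 0, len(text)
--     while i < n:
--         c = text[i]
--         if c in "。？":
--             parts.append("".join(buf)); buf = []; i += 1
--         elif c in ".!?" and i + 1 < n and text[i + 1] == " ":
--             parts.append("".join(buf)); buf = []; i += 2
--         else:
--             buf.append(c); i += 1
--     parts.append("".join(buf))
--     sentences = [s.strip() for s in parts if s.strip()]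
--     out = ". ".join(sentences[:max_sentences])
--     return out if len(out) <= max_chars else out[: max_chars - 1] + "…"
-- ===== Notes on version B (the rewrite author's own statement) =====
-- stated objective: alternative
-- what changed: Replaces A's five sequential list-rebuilding split passes (one per separator) with a single left-to-right scan that cuts at any separator occurrence in one pass over the text.
import Mathlib
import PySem

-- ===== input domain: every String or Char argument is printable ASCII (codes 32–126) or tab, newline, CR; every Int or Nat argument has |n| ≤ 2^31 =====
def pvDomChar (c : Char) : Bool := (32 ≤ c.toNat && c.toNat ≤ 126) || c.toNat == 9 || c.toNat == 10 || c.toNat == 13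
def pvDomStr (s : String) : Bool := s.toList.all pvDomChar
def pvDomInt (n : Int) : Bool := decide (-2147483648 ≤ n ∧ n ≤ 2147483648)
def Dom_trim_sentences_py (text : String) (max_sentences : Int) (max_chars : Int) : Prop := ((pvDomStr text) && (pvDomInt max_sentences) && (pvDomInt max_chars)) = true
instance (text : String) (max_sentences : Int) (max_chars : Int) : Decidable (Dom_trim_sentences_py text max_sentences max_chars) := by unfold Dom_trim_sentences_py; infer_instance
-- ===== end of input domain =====

-- B replaces A's five sequential split passes by one single left-to-right scan; return value proved equal on the ASCII domain.


-- ===== PORT A =====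
-- literal port of A: five sequential split passes ('for sep in seps: for p in parts: tmp.extend(p.split(sep))'),
-- then strip/filter, join of parts[:max_sentences], and the max_chars truncation
def trim_sentences_py (text : String) (max_sentences : Int) (max_chars : Int) : String :=
  if text.toList.isEmpty then text
  else
    let seps : List (List Char) := [['.', ' '], ['。'], ['!', ' '], ['？'], ['?', ' ']]
    let parts0 : List (List Char) := [text.toList]
    let parts1 := seps.foldl (fun parts sep => parts.foldl (fun tmp p => tmp ++ PySem.Chars.splitOn p sep) []) parts0
    let parts2 := (parts1.filter (fun p => !(PySem.Chars.strip p).isEmpty)).map PySem.Chars.strip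
    let trimmed := PySem.Chars.join ['.', ' '] (PySem.List.slice parts2 none (some max_sentences))
    if PySem.Chars.len trimmed > max_chars then
      String.ofList (PySem.List.slice trimmed none (some (max_chars - 1)) ++ ['…'])
    else
      String.ofList trimmed

-- ===== PORT B =====
-- B's single pass (Source B's while-loop: buf = acc, the remaining text = the list argument);
-- exact: at each position at most one separator can match (their first characters differ)
def pvScan (acc : List Char) : List Char → List (List Char)
  | [] => [acc.reverse]
  | c :: rest =>
    if c = '。' ∨ c = '？' then
      acc.reverse :: pvScan [] rest
    else
      match rest with
      | [] => [(c :: acc).reverse]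
      | d :: rest' =>
        if (c = '.' ∨ c = '!' ∨ c = '?') ∧ d = ' ' then
          acc.reverse :: pvScan [] rest'
        else
          pvScan (c :: acc) (d :: rest')
termination_by l => l.length

def trim_sentences_py_alt (text : String) (max_sentences : Int) (max_chars : Int) : String :=
  if text.toList.isEmpty then text
  else
    let sentences := ((pvScan [] text.toList).filter (fun p => !(PySem.Chars.strip p).isEmpty)).map PySem.Chars.strip
    let out := PySem.Chars.join ['.', ' '] (PySem.List.slice sentences none (some max_sentences))
    if PySem.Chars.len out ≤ max_chars then String.ofList out
    else String.ofList (PySem.List.slice out none (some (max_chars - 1)) ++ ['…'])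

-- ===== PRECONDITION & SPEC =====
def Spec_trim_sentences_py (text : String) (max_sentences : Int) (max_chars : Int) (out : String) : Prop := out = trim_sentences_py_alt text max_sentences max_chars
instance (text : String) (max_sentences : Int) (max_chars : Int) (out : String) : Decidable (Spec_trim_sentences_py text max_sentences max_chars out) := by unfold Spec_trim_sentences_py; infer_instance

-- ===== CLAIM (what is proved, stated in full; the proofs are below) =====
def Claim_equal_trim_sentences_py : Prop := ∀ (text : String) (max_sentences : Int) (max_chars : Int), Dom_trim_sentences_py text max_sentences max_chars → Spec_trim_sentences_py text max_sentences max_chars (trim_sentences_py text max_sentences max_chars)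

-- ===== LEMMAS AND PROOFS =====

def pvMapHead (f : List Char → List Char) : List (List Char) → List (List Char)
  | [] => []
  | h :: t => f h :: t

theorem pvMapHead_pvMapHead (f g : List Char → List Char) (X : List (List Char)) :
    pvMapHead f (pvMapHead g X) = pvMapHead (fun u => f (g u)) X := by
  cases X <;> simp [pvMapHead]

theorem pvMapHead_congr (f g : List Char → List Char) (X : List (List Char)) (h : ∀ u, f u = g u) :
    pvMapHead f X = pvMapHead g X := by
  cases X <;> simp [pvMapHead, h]

theorem pvMapHead_id (X : List (List Char)) : pvMapHead (fun u => u) X = X := by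
  cases X <;> simp [pvMapHead]

-- clean structural recursion computing Python's s.split(sep) for sep ≠ ""
def pvSplit (sep : List Char) : List Char → List (List Char)
  | [] => [[]]
  | c :: r =>
    if sep.isPrefixOf (c :: r) then [] :: pvSplit sep (r.drop (sep.length - 1))
    else pvMapHead (fun u => c :: u) (pvSplit sep r)
termination_by l => l.length
decreasing_by all_goals simp

theorem pvSplit_nil (sep : List Char) : pvSplit sep [] = [[]] := by simp [pvSplit]

theorem pvSplit_cut (sep : List Char) (c : Char) (r : List Char) (h : sep.isPrefixOf (c :: r)) :
    pvSplit sep (c :: r) = [] :: pvSplit sep (r.drop (sep.length - 1)) := by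
  rw [pvSplit, if_pos h]

theorem pvSplit_cons (sep : List Char) (c : Char) (r : List Char) (h : ¬ sep.isPrefixOf (c :: r) = true) :
    pvSplit sep (c :: r) = pvMapHead (fun u => c :: u) (pvSplit sep r) := by
  rw [pvSplit, if_neg h]

theorem pvSplit_ne_nil (sep : List Char) : ∀ l : List Char, pvSplit sep l ≠ [] := by
  intro l
  induction l with
  | nil => simp [pvSplit]
  | cons c r ih =>
    rw [pvSplit]
    split
    · simp
    · cases hx : pvSplit sep r with
      | nil => exact absurd hx ih
      | cons h t => simp [pvMapHead]

theorem pvGo_spec (sep : List Char) (hsep : sep ≠ []) :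
    ∀ (fuel : Nat) (l cur : List Char) (acc : List (List Char)), l.length < fuel →
      PySem.Chars.splitOn.go sep fuel l cur acc
        = acc.reverse ++ pvMapHead (fun u => cur.reverse ++ u) (pvSplit sep l) := by
  intro fuel
  induction fuel with
  | zero => intro l cur acc h; omega
  | succ f ih =>
    intro l cur acc h
    cases l with
    | nil =>
      rw [PySem.Chars.splitOn.go.eq_2 sep (f + 1) cur acc (by omega)]
      simp [pvSplit_nil, pvMapHead]
    | cons c r =>
      rw [PySem.Chars.splitOn.go.eq_3]
      have hlp : 0 < sep.length := List.length_pos_iff.mpr hsep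
      by_cases hp : sep.isPrefixOf (c :: r) = true
      · rw [if_pos hp]
        have hlen : (List.drop sep.length (c :: r)).length < f := by
          simp at h ⊢; omega
        rw [ih _ [] (cur.reverse :: acc) hlen]
        rw [pvSplit_cut sep c r hp]
        have hd : List.drop sep.length (c :: r) = List.drop (sep.length - 1) r := by
          have hsl : sep.length - 1 + 1 = sep.length := by omega
          rw [← hsl, List.drop_succ_cons]
          simp
        rw [hd]
        rw [pvMapHead_congr _ (fun u => u) _ (by simp), pvMapHead_id]
        simp [pvMapHead]
      · rw [if_neg hp]
        rw [ih r (c :: cur) acc (by simp at h ⊢; omega)]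
        rw [pvSplit_cons sep c r hp, pvMapHead_pvMapHead]
        apply congrArg
        apply pvMapHead_congr
        intro u; simp

theorem splitOn_eq_pvSplit (l sep : List Char) (hsep : sep ≠ []) :
    PySem.Chars.splitOn l sep = pvSplit sep l := by
  unfold PySem.Chars.splitOn
  rw [pvGo_spec sep hsep (l.length + 1) l [] [] (by omega)]
  simp only [List.reverse_nil, List.nil_append]
  rw [pvMapHead_congr _ (fun u => u) _ (by simp), pvMapHead_id]

theorem pvSplit_singleton_not_mem (c : Char) (l : List Char) (h : c ∉ l) : pvSplit [c] l = [l] := by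
  induction l with
  | nil => simp [pvSplit]
  | cons a r ih =>
    have hca : ¬ (c = a) := fun hc => h (hc ▸ List.mem_cons_self)
    rw [pvSplit_cons _ _ _ (by simp [List.isPrefixOf]; intro hb; exact absurd hb hca)]
    rw [ih (fun hm => h (List.mem_cons_of_mem _ hm))]
    simp [pvMapHead]

theorem mem_of_mem_pvSplit (sep : List Char) :
    ∀ (n : Nat) (l : List Char), l.length ≤ n → ∀ p ∈ pvSplit sep l, ∀ c ∈ p, c ∈ l := by
  intro n
  induction n with
  | zero =>
    intro l hl p hp c hc
    have : l = [] := List.eq_nil_of_length_eq_zero (by omega)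
    subst this
    rw [pvSplit_nil] at hp
    simp at hp; subst hp; simp at hc
  | succ n ih =>
    intro l hl p hp c hc
    cases l with
    | nil =>
      rw [pvSplit_nil] at hp; simp at hp; subst hp; simp at hc
    | cons a r =>
      by_cases hpre : sep.isPrefixOf (a :: r) = true
      · rw [pvSplit_cut _ _ _ hpre] at hp
        rcases List.mem_cons.mp hp with hp | hp
        · subst hp; simp at hc
        · have hcr : c ∈ List.drop (sep.length - 1) r := by
            refine ih (List.drop (sep.length - 1) r) ?_ p hp c hc
            simp at hl ⊢; omega
          exact List.mem_cons_of_mem _ (List.mem_of_mem_drop hcr)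
      · rw [pvSplit_cons _ _ _ hpre] at hp
        cases hx : pvSplit sep r with
        | nil => exact absurd hx (pvSplit_ne_nil sep r)
        | cons h t =>
          rw [hx] at hp
          simp only [pvMapHead] at hp
          rcases List.mem_cons.mp hp with hp | hp
          · subst hp
            rcases List.mem_cons.mp hc with rfl | hc
            · exact List.mem_cons_self
            · have : c ∈ r := ih r (by simp at hl; omega) h (hx ▸ List.mem_cons_self) c hc
              exact List.mem_cons_of_mem _ this
          · have : c ∈ r := ih r (by simp at hl; omega) p (hx ▸ List.mem_cons_of_mem _ hp) c hc
            exact List.mem_cons_of_mem _ this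

theorem flatMap_id_of (X : List (List Char)) (f : List Char → List (List Char))
    (h : ∀ p ∈ X, f p = [p]) : X.flatMap f = X := by
  induction X with
  | nil => simp
  | cons a t ih =>
    simp only [List.flatMap_cons, h a List.mem_cons_self]
    rw [ih (fun p hp => h p (List.mem_cons_of_mem _ hp))]
    simp

-- head of a split list is [] or starts with the original head character
def pvHeadOk (b : Char) (ps : List (List Char)) : Prop :=
  ∃ h t, ps = h :: t ∧ (h = [] ∨ ∃ u, h = b :: u)

theorem pvHeadOk_pvSplit (x b : Char) (t : List Char) :
    pvHeadOk b (pvSplit [x, ' '] (b :: t)) := by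
  by_cases hp : List.isPrefixOf [x, ' '] (b :: t) = true
  · rw [pvSplit_cut _ _ _ hp]
    exact ⟨[], _, rfl, Or.inl rfl⟩
  · rw [pvSplit_cons _ _ _ hp]
    cases hx : pvSplit [x, ' '] t with
    | nil => exact absurd hx (pvSplit_ne_nil _ _)
    | cons h t' => exact ⟨b :: h, t', by simp [pvMapHead], Or.inr ⟨h, rfl⟩⟩

theorem pvHeadOk_flatMap (x b : Char) (ps : List (List Char)) (h : pvHeadOk b ps) :
    pvHeadOk b (ps.flatMap (pvSplit [x, ' '])) := by
  obtain ⟨h0, t0, rfl, hprop⟩ := h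
  rcases hprop with rfl | ⟨u, rfl⟩
  · exact ⟨[], t0.flatMap (pvSplit [x, ' ']),
      by rw [List.flatMap_cons, pvSplit_nil]; rfl, Or.inl rfl⟩
  · obtain ⟨h1, t1, heq, hprop1⟩ := pvHeadOk_pvSplit x b u
    exact ⟨h1, t1 ++ t0.flatMap (pvSplit [x, ' ']),
      by rw [List.flatMap_cons, heq]; rfl, hprop1⟩

-- cons a character through one flatMap-split level
theorem pvCons_level (x a b : Char) (hne : ¬ (a = x ∧ b = ' ')) (ps : List (List Char))
    (h : pvHeadOk b ps) :
    (pvMapHead (fun u => a :: u) ps).flatMap (pvSplit [x, ' '])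
      = pvMapHead (fun u => a :: u) (ps.flatMap (pvSplit [x, ' '])) := by
  obtain ⟨h0, t0, rfl, hprop⟩ := h
  have hnp : ¬ List.isPrefixOf [x, ' '] (a :: h0) = true := by
    rcases hprop with rfl | ⟨u, rfl⟩
    · simp [List.isPrefixOf]
    · simp [List.isPrefixOf]
      intro hxa hb
      exact hne ⟨hxa.symm, hb.symm⟩
  simp only [pvMapHead, List.flatMap_cons]
  rw [pvSplit_cons _ _ _ hnp]
  cases hps2 : pvSplit [x, ' '] h0 with
  | nil => exact absurd hps2 (pvSplit_ne_nil _ _)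
  | cons p ps' => simp [pvMapHead]

-- a separator sitting at the head of the first piece cuts it
theorem pvCut_level (x : Char) (ps : List (List Char)) (hps : ps ≠ []) :
    (pvMapHead (fun u => x :: ' ' :: u) ps).flatMap (pvSplit [x, ' '])
      = [] :: ps.flatMap (pvSplit [x, ' ']) := by
  cases ps with
  | nil => exact absurd rfl hps
  | cons h t =>
    simp only [pvMapHead, List.flatMap_cons]
    rw [pvSplit_cut _ _ _ (by simp [List.isPrefixOf])]
    simp

theorem pvCut0 (sep : List Char) (X : List (List Char)) :
    (([] : List Char) :: X).flatMap (pvSplit sep) = [] :: X.flatMap (pvSplit sep) := by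
  simp [List.flatMap_cons, pvSplit_nil]

-- a different two-char separator head passes through a flatMap-split level
theorem pvPass_level (x y : Char) (hxy : ¬ x = y) (hy : ¬ ' ' = y) (ps : List (List Char)) (hps : ps ≠ []) :
    (pvMapHead (fun u => x :: ' ' :: u) ps).flatMap (pvSplit [y, ' '])
      = pvMapHead (fun u => x :: ' ' :: u) (ps.flatMap (pvSplit [y, ' '])) := by
  cases ps with
  | nil => exact absurd rfl hps
  | cons h t =>
    simp only [pvMapHead, List.flatMap_cons]
    rw [pvSplit_cons _ _ _ (by simp [List.isPrefixOf]; intro hya; first | exact hxy hya | exact hxy hya.symm)]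
    rw [pvSplit_cons _ _ _ (by simp [List.isPrefixOf]; intro hya; first | exact hy hya | exact hy hya.symm | exact (hy hya).elim | exact (hy hya.symm).elim)]
    rw [pvMapHead_pvMapHead]
    cases hps2 : pvSplit [y, ' '] h with
    | nil => exact absurd hps2 (pvSplit_ne_nil _ _)
    | cons p ps' => simp [pvMapHead]

theorem pvFlatMap_ne_nil (sep : List Char) (ps : List (List Char)) (h : ps ≠ []) :
    ps.flatMap (pvSplit sep) ≠ [] := by
  cases ps with
  | nil => exact absurd rfl h
  | cons h0 t =>
    simp only [List.flatMap_cons]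
    intro hc
    rcases List.append_eq_nil_iff.mp hc with ⟨h1, _⟩
    exact pvSplit_ne_nil sep h0 h1

theorem pvScan_nil (acc : List Char) : pvScan acc [] = [acc.reverse] := by simp [pvScan]

theorem pvScan_acc : ∀ (n : Nat) (l acc : List Char), l.length ≤ n →
    pvScan acc l = pvMapHead (fun u => acc.reverse ++ u) (pvScan [] l) := by
  intro n
  induction n with
  | zero =>
    intro l acc hl
    have : l = [] := List.eq_nil_of_length_eq_zero (by omega)
    subst this
    simp [pvScan_nil, pvMapHead]
  | succ n ih =>
    intro l acc hl
    cases l with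
    | nil => simp [pvScan_nil, pvMapHead]
    | cons c rest =>
      cases rest with
      | nil =>
        by_cases huni : c = '。' ∨ c = '？'
        · simp only [pvScan.eq_2, if_pos huni]
          simp [pvScan_nil, pvMapHead]
        · simp only [pvScan.eq_2, if_neg huni]
          simp [pvMapHead]
      | cons d rest' =>
        by_cases huni : c = '。' ∨ c = '？'
        · simp only [pvScan.eq_3, if_pos huni]
          simp [pvMapHead]
        · by_cases hsep : (c = '.' ∨ c = '!' ∨ c = '?') ∧ d = ' '
          · simp only [pvScan.eq_3, if_neg huni, if_pos hsep]
            simp [pvMapHead]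
          · simp only [pvScan.eq_3, if_neg huni, if_neg hsep]
            rw [ih (d :: rest') (c :: acc) (by simp at hl ⊢; omega)]
            rw [ih (d :: rest') [c] (by simp at hl ⊢; omega)]
            rw [pvMapHead_pvMapHead]
            apply pvMapHead_congr
            intro u; simp

def pvF (l : List Char) : List (List Char) :=
  ((pvSplit ['.', ' '] l).flatMap (pvSplit ['!', ' '])).flatMap (pvSplit ['?', ' '])

theorem pvNotUni (a : Char) (h : pvDomChar a = true) : ¬ (a = '。' ∨ a = '？') := by
  rintro (rfl | rfl) <;> exact absurd h (by decide)

theorem pvMain : ∀ (n : Nat) (l : List Char), l.length ≤ n → (∀ c ∈ l, pvDomChar c = true) →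
    pvF l = pvScan [] l := by
  intro n
  induction n with
  | zero =>
    intro l hl _
    have : l = [] := List.eq_nil_of_length_eq_zero (by omega)
    subst this
    simp [pvF, pvSplit_nil, pvScan_nil]
  | succ n ih =>
    intro l hl hd
    cases l with
    | nil => simp [pvF, pvSplit_nil, pvScan_nil]
    | cons a r =>
      have hda : pvDomChar a = true := hd a List.mem_cons_self
      have hunia : ¬ (a = '。' ∨ a = '？') := pvNotUni a hda
      cases r with
      | nil =>
        have hx : ∀ x : Char, pvSplit [x, ' '] [a] = [[a]] := by
          intro x
          rw [pvSplit_cons _ _ _ (by simp [List.isPrefixOf]), pvSplit_nil]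
          simp [pvMapHead]
        simp only [pvF, hx, List.flatMap_cons, List.flatMap_nil, List.append_nil]
        rw [pvScan.eq_2, if_neg hunia]
        simp
      | cons b t =>
        have hdt : ∀ c ∈ b :: t, pvDomChar c = true := fun c hc => hd c (List.mem_cons_of_mem _ hc)
        have hih : pvF (b :: t) = pvScan [] (b :: t) := ih (b :: t) (by simp at hl ⊢; omega) hdt
        have hiht : pvF t = pvScan [] t :=
          ih t (by simp at hl ⊢; omega) (fun c hc => hdt c (List.mem_cons_of_mem _ hc))
        by_cases hsep : (a = '.' ∨ a = '!' ∨ a = '?') ∧ b = ' '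
        · obtain ⟨hx, rfl⟩ := hsep
          have hscan : pvScan [] (a :: ' ' :: t) = [] :: pvScan [] t := by
            rw [pvScan.eq_3, if_neg hunia,
              if_pos (show (a = '.' ∨ a = '!' ∨ a = '?') ∧ (' ' : Char) = ' ' from ⟨hx, rfl⟩)]
            simp
          rcases hx with rfl | rfl | rfl
          · -- ". " cuts at the first level
            have h1 : pvSplit ['.', ' '] ('.' :: ' ' :: t) = [] :: pvSplit ['.', ' '] t := by
              rw [pvSplit_cut _ _ _ (by simp [List.isPrefixOf])]
              simp
            unfold pvF
            rw [h1, pvCut0, pvCut0, hscan]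
            exact congrArg _ hiht
          · -- "! " cuts at the second level
            have h1 : pvSplit ['.', ' '] ('!' :: ' ' :: t)
                = pvMapHead (fun u => '!' :: ' ' :: u) (pvSplit ['.', ' '] t) := by
              rw [pvSplit_cons _ _ _ (by simp [List.isPrefixOf]),
                  pvSplit_cons _ _ _ (by simp [List.isPrefixOf]),
                  pvMapHead_pvMapHead]
            unfold pvF
            rw [h1, pvCut_level '!' _ (pvSplit_ne_nil _ _), pvCut0, hscan]
            exact congrArg _ hiht
          · -- "? " cuts at the third level
            have h1 : pvSplit ['.', ' '] ('?' :: ' ' :: t)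
                = pvMapHead (fun u => '?' :: ' ' :: u) (pvSplit ['.', ' '] t) := by
              rw [pvSplit_cons _ _ _ (by simp [List.isPrefixOf]),
                  pvSplit_cons _ _ _ (by simp [List.isPrefixOf]),
                  pvMapHead_pvMapHead]
            unfold pvF
            rw [h1, pvPass_level '?' '!' (by decide) (by decide) _ (pvSplit_ne_nil _ _)]
            rw [pvCut_level '?' _ (pvFlatMap_ne_nil _ _ (pvSplit_ne_nil _ _)), hscan]
            exact congrArg _ hiht
        · have h3 : ¬ (a = '.' ∧ b = ' ') ∧ ¬ (a = '!' ∧ b = ' ') ∧ ¬ (a = '?' ∧ b = ' ') := by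
            constructor
            · intro ⟨h1, h2⟩; exact hsep ⟨Or.inl h1, h2⟩
            constructor
            · intro ⟨h1, h2⟩; exact hsep ⟨Or.inr (Or.inl h1), h2⟩
            · intro ⟨h1, h2⟩; exact hsep ⟨Or.inr (Or.inr h1), h2⟩
          have h1 : pvSplit ['.', ' '] (a :: b :: t)
              = pvMapHead (fun u => a :: u) (pvSplit ['.', ' '] (b :: t)) := by
            refine pvSplit_cons _ _ _ ?_
            simp [List.isPrefixOf]
            intro hpa hpb
            exact h3.1 ⟨hpa.symm, hpb.symm⟩
          unfold pvF
          rw [h1, pvCons_level '!' a b h3.2.1 _ (pvHeadOk_pvSplit '.' b t)]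
          rw [pvCons_level '?' a b h3.2.2 _ (pvHeadOk_flatMap '!' b _ (pvHeadOk_pvSplit '.' b t))]
          have hrhs : pvScan [] (a :: b :: t) = pvMapHead (fun u => a :: u) (pvScan [] (b :: t)) := by
            rw [pvScan.eq_3, if_neg hunia, if_neg hsep]
            rw [pvScan_acc (b :: t).length (b :: t) [a] le_rfl]
            apply pvMapHead_congr
            intro u; simp
          rw [hrhs]
          exact congrArg _ hih

-- the five-pass fold of A equals the one-pass scan of B on domain strings
theorem pvPartsEq (l : List Char) (hd : ∀ c ∈ l, pvDomChar c = true) :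
    ([['.', ' '], ['。'], ['!', ' '], ['？'], ['?', ' ']] : List (List Char)).foldl
        (fun parts sep => parts.foldl (fun tmp p => tmp ++ PySem.Chars.splitOn p sep) []) [l]
      = pvScan [] l := by
  have huni : ∀ (c : Char) (X : List (List Char)),
      (∀ p ∈ X, ∀ x ∈ p, x ∈ l) → pvDomChar c = false →
      X.flatMap (fun p => PySem.Chars.splitOn p [c]) = X := by
    intro c X hX hc
    refine flatMap_id_of X _ (fun p hp => ?_)
    rw [splitOn_eq_pvSplit _ _ (by simp)]
    refine pvSplit_singleton_not_mem c p (fun hm => ?_)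
    have := hd c (hX p hp c hm)
    rw [hc] at this; exact absurd this (by simp)
  simp only [List.foldl_cons, List.foldl_nil,
    PySem.List.foldl_append_eq_flatMap, List.nil_append]
  have e1 : ∀ (p : List Char) (x : Char),
      PySem.Chars.splitOn p [x, ' '] = pvSplit [x, ' '] p := by
    intro p x; exact splitOn_eq_pvSplit p _ (by simp)
  simp only [e1]
  have s1 : ([l] : List (List Char)).flatMap (fun p => pvSplit ['.', ' '] p) = pvSplit ['.', ' '] l := by
    simp [List.flatMap_cons]
  rw [s1]
  have m1 : ∀ p ∈ pvSplit ['.', ' '] l, ∀ x ∈ p, x ∈ l := by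
    intro p hp x hx
    exact mem_of_mem_pvSplit _ l.length l le_rfl p hp x hx
  rw [huni '。' _ m1 (by decide)]
  have m2 : ∀ p ∈ (pvSplit ['.', ' '] l).flatMap (fun p => pvSplit ['!', ' '] p), ∀ x ∈ p, x ∈ l := by
    intro p hp x hx
    rcases List.mem_flatMap.mp hp with ⟨q, hq, hpq⟩
    exact m1 q hq x (mem_of_mem_pvSplit _ q.length q le_rfl p hpq x hx)
  rw [huni '？' _ m2 (by decide)]
  exact pvMain l.length l le_rfl hd

-- ===== VERDICT (by name: the statement is the Claim_ definition above) =====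
theorem trim_sentences_py_spec : Claim_equal_trim_sentences_py := by
  intro text max_sentences max_chars hdom
  unfold Spec_trim_sentences_py trim_sentences_py trim_sentences_py_alt
  by_cases hemp : text.toList.isEmpty
  · simp [hemp]
  · simp only [hemp, Bool.false_eq_true, if_false]
    have hd : ∀ c ∈ text.toList, pvDomChar c = true := by
      unfold Dom_trim_sentences_py at hdom
      simp only [Bool.and_eq_true] at hdom
      have := hdom.1.1
      unfold pvDomStr at this
      exact fun c hc => List.all_eq_true.mp this c hc
    rw [pvPartsEq text.toList hd]
    split_ifs with h1 h2 h3 <;> first | rfl | omega
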